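-- pv_equiv track=rewrite | github.com/Mattosterone/flash-crash-detection | src/robustness.py | _count_dl_params
-- ===== SOURCE A (Python) =====
-- def _count_dl_params(input_size: int, hidden_size: int, num_layers: int) -> dict[str, int]:
--     """Compute parameter counts for RNN, LSTM, GRU analytically.
--
--     For a single recurrent layer:
--       RNN  : (input * hidden) + (hidden * hidden) + 2*hidden
--       LSTM : 4 * ((input * hidden) + (hidden * hidden) + 2*hidden)
--       GRU  : 3 * ((input * hidden) + (hidden * hidden) + 2*hidden)
--
--     Parameters follow PyTorch defaults (bias_ih + bias_hh per gate).
--     """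
--     def _layer_params(rnn_type: str, in_sz: int, h_sz: int) -> int:
--         gate_multiplier = {"RNN": 1, "LSTM": 4, "GRU": 3}[rnn_type]
--         return gate_multiplier * (in_sz * h_sz + h_sz * h_sz + 2 * h_sz)
--
--     counts: dict[str, int] = {}
--     for rnn_type in ("RNN", "LSTM", "GRU"):
--         total = 0
--         for layer in range(num_layers):
--             in_sz = input_size if layer == 0 else hidden_size
--             total += _layer_params(rnn_type, in_sz, hidden_size)
--         total += hidden_size + 1  # FC: weight + bias
--         counts[rnn_type] = total
--
--     return counts
-- ===== SOURCE B (Python) =====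
-- def _count_dl_params(input_size: int, hidden_size: int, num_layers: int) -> dict[str, int]:
--     """Closed-form parameter counts for RNN/LSTM/GRU (no loop over layers)."""
--     h = hidden_size
--     if num_layers > 0:
--         rec = (input_size * h + h * h + 2 * h) + (num_layers - 1) * (h * h + h * h + 2 * h)
--     else:
--         rec = 0
--     fc = h + 1
--     return {"RNN": rec + fc, "LSTM": 4 * rec + fc, "GRU": 3 * rec + fc}
-- ===== Notes on version B (the rewrite author's own statement) =====
-- stated objective: faster
-- what changed: Replaced the per-layer loop (run three times, once per RNN type) with a closed-form expression: first-layer term plus (num_layers-1) identical-layer terms, multiplied per gate count.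
import Mathlib
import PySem

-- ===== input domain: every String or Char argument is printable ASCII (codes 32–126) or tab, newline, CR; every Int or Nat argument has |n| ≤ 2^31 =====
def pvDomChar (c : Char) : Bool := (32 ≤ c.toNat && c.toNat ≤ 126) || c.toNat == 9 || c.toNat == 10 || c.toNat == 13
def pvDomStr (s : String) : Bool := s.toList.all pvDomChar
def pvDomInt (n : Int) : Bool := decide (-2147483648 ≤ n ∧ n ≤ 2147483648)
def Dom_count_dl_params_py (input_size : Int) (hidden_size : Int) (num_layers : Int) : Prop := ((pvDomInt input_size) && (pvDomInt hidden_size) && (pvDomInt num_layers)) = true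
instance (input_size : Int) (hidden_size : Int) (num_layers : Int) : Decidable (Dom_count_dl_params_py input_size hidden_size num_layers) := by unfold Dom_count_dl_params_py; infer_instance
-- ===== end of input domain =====

-- B replaces A's per-layer accumulation loop with a closed-form expression (objective: faster, O(1) vs O(num_layers)).

-- ===== PORT A =====
-- helper _layer_params; the literal dict lookup always hits, so .getD 0 is exact here
def pvLayerParams (rnn_type : String) (in_sz : Int) (h_sz : Int) : Int :=
  let gate_multiplier := ((PySem.Dict.ofList [("RNN", (1 : Int)), ("LSTM", 4), ("GRU", 3)]).get? rnn_type).getD 0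
  gate_multiplier * (in_sz * h_sz + h_sz * h_sz + 2 * h_sz)

def count_dl_params_py (input_size : Int) (hidden_size : Int) (num_layers : Int) : List (String × Int) :=
  ((["RNN", "LSTM", "GRU"]).foldl (fun counts rnn_type =>
    let total := (PySem.List.pyRange 0 num_layers 1).foldl (fun total layer =>
      total + pvLayerParams rnn_type (if layer == 0 then input_size else hidden_size) hidden_size) 0
    PySem.Dict.insert counts rnn_type (total + hidden_size + 1)) PySem.Dict.empty).items

-- ===== PORT B =====
def count_dl_params_py_alt (input_size : Int) (hidden_size : Int) (num_layers : Int) : List (String × Int) :=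
  let h := hidden_size
  let rec_ := if num_layers > 0 then
      (input_size * h + h * h + 2 * h) + (num_layers - 1) * (h * h + h * h + 2 * h)
    else 0
  let fc := h + 1
  [("RNN", rec_ + fc), ("LSTM", 4 * rec_ + fc), ("GRU", 3 * rec_ + fc)]

-- ===== PRECONDITION & SPEC =====
def Spec_count_dl_params_py (input_size : Int) (hidden_size : Int) (num_layers : Int) (out : List (String × Int)) : Prop := out = count_dl_params_py_alt input_size hidden_size num_layers
instance (input_size : Int) (hidden_size : Int) (num_layers : Int) (out : List (String × Int)) : Decidable (Spec_count_dl_params_py input_size hidden_size num_layers out) := by unfold Spec_count_dl_params_py; infer_instance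

-- ===== CLAIM (what is proved, stated in full; the proofs are below) =====
def Claim_equal_count_dl_params_py : Prop := ∀ (input_size : Int) (hidden_size : Int) (num_layers : Int), Dom_count_dl_params_py input_size hidden_size num_layers → Spec_count_dl_params_py input_size hidden_size num_layers (count_dl_params_py input_size hidden_size num_layers)

-- ===== LEMMAS AND PROOFS =====

-- A's inner loop over range(m): first layer uses iv, the rest hv
theorem pv_total_aux (s : String) (iv hv : Int) (m : Nat) (init : Int) :
    ((List.range m).map (fun k => ((k : Nat) : Int))).foldl
      (fun total layer => total + pvLayerParams s (if layer == 0 then iv else hv) hv) init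
    = init + (if m = 0 then 0 else pvLayerParams s iv hv + ((m : Int) - 1) * pvLayerParams s hv hv) := by
  induction m with
  | zero => simp
  | succ k ih =>
    rw [List.range_succ, List.map_append, List.foldl_append, ih]
    cases k with
    | zero => simp
    | succ j =>
      have h1 : ((((j + 1 : Nat)) : Int) == 0) = false := by
        simp
        omega
      simp only [List.map_cons, List.map_nil, List.foldl_cons, List.foldl_nil, h1]
      have hj : ¬ (j + 1 = 0) := by omega
      simp only [hj, if_false, Nat.succ_ne_zero]
      push_cast
      ring

theorem pv_total (s : String) (iv hv n : Int) :
    (PySem.List.pyRange 0 n 1).foldl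
      (fun total layer => total + pvLayerParams s (if layer == 0 then iv else hv) hv) 0
    = if n > 0 then pvLayerParams s iv hv + (n - 1) * pvLayerParams s hv hv else 0 := by
  rw [PySem.List.pyRange_one]
  simp only [Int.zero_add, Int.sub_zero]
  rw [pv_total_aux s iv hv n.toNat 0]
  by_cases hn : n > 0
  · have h1 : ¬ (n.toNat = 0) := by omega
    have h2 : ((n.toNat : Int)) = n := by omega
    simp [h1, hn, h2]
  · have h1 : n.toNat = 0 := by omega
    simp [h1, hn]

theorem pv_gate_RNN :
    ((PySem.Dict.ofList [("RNN", (1 : Int)), ("LSTM", 4), ("GRU", 3)]).get? "RNN").getD 0 = 1 := by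
  decide

theorem pv_gate_LSTM :
    ((PySem.Dict.ofList [("RNN", (1 : Int)), ("LSTM", 4), ("GRU", 3)]).get? "LSTM").getD 0 = 4 := by
  decide

theorem pv_gate_GRU :
    ((PySem.Dict.ofList [("RNN", (1 : Int)), ("LSTM", 4), ("GRU", 3)]).get? "GRU").getD 0 = 3 := by
  decide

theorem pv_items3 (X Y Z : Int) :
    (PySem.Dict.insert (PySem.Dict.insert (PySem.Dict.insert (PySem.Dict.empty) "RNN" X) "LSTM" Y) "GRU" Z).items
    = [("RNN", X), ("LSTM", Y), ("GRU", Z)] := by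
  rfl

-- ===== VERDICT (by name: the statement is the Claim_ definition above) =====
theorem count_dl_params_py_spec : Claim_equal_count_dl_params_py := by
  intro input_size hidden_size num_layers _
  unfold Spec_count_dl_params_py count_dl_params_py count_dl_params_py_alt
  simp only [List.foldl_cons, List.foldl_nil]
  rw [pv_total "RNN" input_size hidden_size num_layers,
      pv_total "LSTM" input_size hidden_size num_layers,
      pv_total "GRU" input_size hidden_size num_layers, pv_items3]
  simp only [List.cons.injEq, Prod.mk.injEq, and_true]
  by_cases hn : num_layers > 0 <;>
    simp only [hn, if_true, if_false, pvLayerParams, pv_gate_RNN, pv_gate_LSTM, pv_gate_GRU] <;>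
    norm_num <;> refine ⟨by ring, by ring, by ring⟩
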